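-- pv_equiv track=rewrite | github.com/MadinaMukhiddinovna/python-homeworks | lesson-5/homework/lesson5.py | evens_if_else
-- ===== SOURCE A (Python) =====
-- def evens_if_else(a, b):
--     if a > b:
--         a, b = b, a  # swap to ensure a <= b
--
--     evens = []
--     current = a
--     while current <= b:
--         if current % 2 == 0:
--             evens.append(current)
--         current += 1
--     return evens
-- ===== SOURCE B (Python) =====
-- def evens_if_else(a, b):
--     lo, hi = (a, b) if a <= b else (b, a)
--     start = lo if lo % 2 == 0 else lo + 1
--     return list(range(start, hi + 1, 2))
-- ===== Notes on version B (the rewrite author's own statement) =====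
-- stated objective: idiomatic
-- what changed: Replaces the element-by-element while loop with a per-element parity test by a single range(start, hi+1, 2) stepping directly over the even numbers.
import Mathlib
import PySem

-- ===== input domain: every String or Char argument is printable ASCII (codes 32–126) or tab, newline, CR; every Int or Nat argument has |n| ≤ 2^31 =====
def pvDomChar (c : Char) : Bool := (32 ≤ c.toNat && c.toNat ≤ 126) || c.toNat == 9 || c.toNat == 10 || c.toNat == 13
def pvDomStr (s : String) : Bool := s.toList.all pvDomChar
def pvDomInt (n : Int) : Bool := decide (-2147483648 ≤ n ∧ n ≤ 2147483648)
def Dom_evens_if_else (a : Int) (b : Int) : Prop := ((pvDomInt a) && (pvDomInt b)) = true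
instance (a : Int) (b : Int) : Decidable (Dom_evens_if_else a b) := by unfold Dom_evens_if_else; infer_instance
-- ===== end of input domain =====

-- B replaces A's integer-by-integer scan with a parity test by a single step-2 range over the evens (idiomatic).

-- ===== PORT A =====
-- the while loop: current counts up to b, appending even values
def evensLoop (b : Int) (current : Int) (evens : List Int) : List Int :=
  if current ≤ b then
    evensLoop b (current + 1) (if PySem.Int.mod current 2 = 0 then evens ++ [current] else evens)
  else evens
termination_by (b + 1 - current).toNat
decreasing_by omega

def evens_if_else (a : Int) (b : Int) : List Int :=
  let p := if a > b then (b, a) else (a, b)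
  evensLoop p.2 p.1 []

-- ===== PORT B =====
def evens_if_else_alt (a : Int) (b : Int) : List Int :=
  let lo := if a ≤ b then a else b
  let hi := if a ≤ b then b else a
  let start := if PySem.Int.mod lo 2 = 0 then lo else lo + 1
  PySem.List.pyRange start (hi + 1) 2

-- ===== PRECONDITION & SPEC =====
def Spec_evens_if_else (a : Int) (b : Int) (out : List Int) : Prop := out = evens_if_else_alt a b
instance (a : Int) (b : Int) (out : List Int) : Decidable (Spec_evens_if_else a b out) := by unfold Spec_evens_if_else; infer_instance

-- ===== CLAIM (what is proved, stated in full; the proofs are below) =====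
def Claim_equal_evens_if_else : Prop := ∀ (a : Int) (b : Int), Dom_evens_if_else a b → Spec_evens_if_else a b (evens_if_else a b)

-- ===== LEMMAS AND PROOFS =====
lemma pyRange_two_nil {a b : Int} (h : b ≤ a) : PySem.List.pyRange a b 2 = [] := by
  rw [PySem.List.pyRange_of_pos a b (by norm_num)]
  simp [Int.not_lt.mpr h]

lemma pyRange_two_cons {a b : Int} (h : a < b) :
    PySem.List.pyRange a b 2 = a :: PySem.List.pyRange (a + 2) b 2 := by
  rw [PySem.List.pyRange_of_pos a b (by norm_num),
      PySem.List.pyRange_of_pos (a + 2) b (by norm_num)]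
  simp only [if_pos h]
  by_cases h2 : a + 2 < b
  · simp only [if_pos h2]
    have hc : ((b - a + 2 - 1) / 2).toNat = ((b - (a + 2) + 2 - 1) / 2).toNat + 1 := by omega
    rw [hc, List.range_succ_eq_map, List.map_cons, List.map_map]
    congr 1
    · ring
    · apply List.map_congr_left
      intro k _
      simp [Function.comp]
      ring
  · simp only [if_neg h2]
    have hc : ((b - a + 2 - 1) / 2).toNat = 1 := by omega
    simp [hc, List.range_one]

lemma evensLoop_eq (b : Int) (current : Int) (acc : List Int) :
    evensLoop b current acc =
      acc ++ PySem.List.pyRange (if PySem.Int.mod current 2 = 0 then current else current + 1) (b + 1) 2 := by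
  induction current, acc using evensLoop.induct b with
  | case1 current acc hle ih =>
    rw [evensLoop, if_pos hle]
    by_cases hev : PySem.Int.mod current 2 = 0
    · have hodd : PySem.Int.mod (current + 1) 2 ≠ 0 := by
        simp [PySem.Int.mod, Int.fmod_eq_emod] at hev ⊢; omega
      simp only [dif_pos hev] at ih
      simp only [if_pos hev]
      rw [ih]
      simp only [if_neg hodd]
      rw [pyRange_two_cons (by omega : current < b + 1)]
      simp [show current + 1 + 1 = current + 2 from by ring]
    · have hev' : PySem.Int.mod (current + 1) 2 = 0 := by
        simp [PySem.Int.mod, Int.fmod_eq_emod] at hev ⊢; omega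
      simp only [dif_neg hev] at ih
      simp only [if_neg hev]
      rw [ih]
      simp only [if_pos hev']
  | case2 current acc hle =>
    rw [evensLoop, if_neg hle]
    rw [pyRange_two_nil (by split_ifs <;> omega)]
    simp

-- ===== VERDICT (by name: the statement is the Claim_ definition above) =====
theorem evens_if_else_spec : Claim_equal_evens_if_else := by
  intro a b _
  unfold Spec_evens_if_else evens_if_else evens_if_else_alt
  by_cases h : a ≤ b
  · rw [if_neg (by omega : ¬ a > b)]
    simp only [if_pos h]
    simpa using evensLoop_eq b a []
  · rw [if_pos (by omega : a > b)]
    simp only [if_neg h]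
    simpa using evensLoop_eq a b []
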